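-- pv_equiv track=rewrite | github.com/jalhackl/COMET | physics_sim_simple_moreparticles_partners_central.py | create_list_of_lists
-- ===== SOURCE A (Python) =====
-- def create_list_of_lists(num_entries, entry_lengths):
--     """
--     Creates a list of lists where each sublist contains sequential numbers.
--
--     :param num_entries: Number of sublists.
--     :param entry_lengths: Either an integer (fixed length for all sublists) or a list of integers (variable lengths).
--     :return: A list of lists with sequential numbers.
--     """
--     list_of_lists = []
--     current_number = 0
--
--     # If a single integer is provided, create uniform-length sublists
--     if isinstance(entry_lengths, int):
--         entry_lengths = [entry_lengths] * num_entries
--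
--     for length in entry_lengths:
--         sublist = list(range(current_number, current_number + length))
--         list_of_lists.append(sublist)
--         current_number += length  # Ensure continuity
--
--     return list_of_lists
-- ===== SOURCE B (Python) =====
-- def create_list_of_lists(num_entries, entry_lengths):
--     if isinstance(entry_lengths, int):
--         entry_lengths = [entry_lengths] * num_entries
--     # Phase 1: boundary table of cumulative start positions.
--     starts = [0]
--     for length in entry_lengths:
--         starts.append(starts[-1] + length)
--     # Phase 2: shape the output by slicing ranges between consecutive boundaries.
--     return [list(range(starts[i], starts[i + 1])) for i in range(len(entry_lengths))]
-- ===== Notes on version B (the rewrite author's own statement) =====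
-- stated objective: alternative
-- what changed: Replaces A's single loop that threads a mutable running counter and appends sublists with a two-phase plan: first build a prefix-sum boundary table of start positions, then produce the result with a comprehension slicing a range between each pair of consecutive boundaries.
import Mathlib
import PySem

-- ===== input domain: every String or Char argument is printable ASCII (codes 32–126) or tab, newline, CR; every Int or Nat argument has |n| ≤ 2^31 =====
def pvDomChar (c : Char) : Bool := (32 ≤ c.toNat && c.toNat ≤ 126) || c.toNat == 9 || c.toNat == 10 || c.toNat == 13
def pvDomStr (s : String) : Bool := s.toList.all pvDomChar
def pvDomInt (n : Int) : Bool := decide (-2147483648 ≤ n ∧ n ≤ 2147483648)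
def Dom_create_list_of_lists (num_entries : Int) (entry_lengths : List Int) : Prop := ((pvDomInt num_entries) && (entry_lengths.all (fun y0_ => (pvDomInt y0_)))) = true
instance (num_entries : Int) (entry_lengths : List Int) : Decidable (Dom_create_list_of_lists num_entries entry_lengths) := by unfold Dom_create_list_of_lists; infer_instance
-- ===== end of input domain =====

-- B replaces A's counter-threading loop by a prefix-sum boundary table followed by a
-- comprehension slicing a range between consecutive boundaries (alternative decomposition).


-- ===== PORT A =====
-- A's single loop: thread (list_of_lists, current_number) through entry_lengths.
-- (The `isinstance(entry_lengths, int)` branch is dead here: the argument is a list.)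
def create_list_of_lists (num_entries : Int) (entry_lengths : List Int) : List (List Int) :=
  (entry_lengths.foldl
    (fun (st : List (List Int) × Int) length =>
      (st.1 ++ [PySem.List.pyRange st.2 (st.2 + length) 1], st.2 + length))
    ([], 0)).1

-- ===== PORT B =====
-- Phase 1 of B: boundary table `starts` (prefix sums), starts[-1] read via pyGetD.
def pvStarts (entry_lengths : List Int) : List Int :=
  entry_lengths.foldl (fun acc length => acc ++ [PySem.List.pyGetD acc (-1) 0 + length]) [0]

-- Phase 2 of B: slice a range between each pair of consecutive boundaries.
def create_list_of_lists_alt (num_entries : Int) (entry_lengths : List Int) : List (List Int) :=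
  (PySem.List.pyRange 0 (entry_lengths.length : Int) 1).map
    (fun i => PySem.List.pyRange (PySem.List.pyGetD (pvStarts entry_lengths) i 0)
                                 (PySem.List.pyGetD (pvStarts entry_lengths) (i + 1) 0) 1)

-- ===== PRECONDITION & SPEC =====
def Spec_create_list_of_lists (num_entries : Int) (entry_lengths : List Int) (out : List (List Int)) : Prop := out = create_list_of_lists_alt num_entries entry_lengths
instance (num_entries : Int) (entry_lengths : List Int) (out : List (List Int)) : Decidable (Spec_create_list_of_lists num_entries entry_lengths out) := by unfold Spec_create_list_of_lists; infer_instance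

-- ===== CLAIM (what is proved, stated in full; the proofs are below) =====
def Claim_equal_create_list_of_lists : Prop := ∀ (num_entries : Int) (entry_lengths : List Int), Dom_create_list_of_lists num_entries entry_lengths → Spec_create_list_of_lists num_entries entry_lengths (create_list_of_lists num_entries entry_lengths)

-- ===== LEMMAS AND PROOFS =====

-- Reference shape: the list of consecutive ranges starting at c.
def pvChunks (c : Int) : List Int → List (List Int)
  | [] => []
  | l :: r => PySem.List.pyRange c (c + l) 1 :: pvChunks (c + l) r

-- Prefix-sum table starting after c.
def pvSums (c : Int) : List Int → List Int
  | [] => []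
  | l :: r => (c + l) :: pvSums (c + l) r

lemma pvA_loop (t : List Int) : ∀ (acc : List (List Int)) (c : Int),
    (t.foldl (fun (st : List (List Int) × Int) length =>
      (st.1 ++ [PySem.List.pyRange st.2 (st.2 + length) 1], st.2 + length)) (acc, c)).1
      = acc ++ pvChunks c t := by
  induction t with
  | nil => intro acc c; simp [pvChunks]
  | cons l r ih =>
      intro acc c
      simp [List.foldl, pvChunks, ih]

lemma pvStarts_loop (t : List Int) : ∀ (p : List Int) (c : Int),
    t.foldl (fun acc length => acc ++ [PySem.List.pyGetD acc (-1) 0 + length]) (p ++ [c])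
      = p ++ c :: pvSums c t := by
  induction t with
  | nil => intro p c; simp [pvSums]
  | cons l r ih =>
      intro p c
      have h := ih (p ++ [c]) (c + l)
      simp [List.foldl, pvSums]
      simpa using h

lemma pvStarts_eq (t : List Int) : pvStarts t = 0 :: pvSums 0 t := by
  have h := pvStarts_loop t [] 0
  simpa [pvStarts] using h

lemma pvGetD_cons_succ (x : Int) (s : List Int) (j : Nat) :
    PySem.List.pyGetD (x :: s) ((j : Int) + 1) 0 = PySem.List.pyGetD s (j : Int) 0 := by
  rw [show ((j : Int) + 1) = ((j + 1 : Nat) : Int) by push_cast; ring,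
      PySem.List.pyGetD_natCast, PySem.List.pyGetD_natCast]
  rfl

lemma pvMap_chunks (t : List Int) : ∀ (c : Int),
    (List.range t.length).map
      (fun k => PySem.List.pyRange (PySem.List.pyGetD (c :: pvSums c t) ((k : Nat) : Int) 0)
                                   (PySem.List.pyGetD (c :: pvSums c t) (((k : Nat) : Int) + 1) 0) 1)
      = pvChunks c t := by
  induction t with
  | nil => intro c; simp [pvChunks]
  | cons l r ih =>
      intro c
      simp only [List.length_cons, List.range_succ_eq_map, List.map_cons, List.map_map, pvChunks]
      congr 1
      · simp [pvSums, PySem.List.pyGetD_ofNat']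
      · rw [← ih (c + l)]
        apply List.map_congr_left
        intro k _
        have h1 : ((Nat.succ k : Nat) : Int) = ((k : Nat) : Int) + 1 := by push_cast; ring
        simp only [Function.comp_apply, h1]
        rw [pvGetD_cons_succ, show ((k : Int) + 1 + 1) = (((k + 1 : Nat)) : Int) + 1 by push_cast; ring,
            pvGetD_cons_succ, show (((k + 1 : Nat)) : Int) = (k : Int) + 1 by push_cast; ring]
        rfl

-- ===== VERDICT (by name: the statement is the Claim_ definition above) =====
theorem create_list_of_lists_spec : Claim_equal_create_list_of_lists := by
  intro num_entries entry_lengths _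
  unfold Spec_create_list_of_lists create_list_of_lists create_list_of_lists_alt
  rw [pvA_loop, pvStarts_eq, PySem.List.pyRange_zero_natCast, List.map_map]
  rw [← pvMap_chunks entry_lengths 0]
  rfl
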